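-- pv_equiv track=rewrite | github.com/johnlspouge/Euler | project_euler/project_euler_68.py | isEverySumEqual
-- ===== SOURCE A (Python) =====
-- LINES = [ [ 0, 1, 2 ], [ 3, 2, 4 ], [ 5, 4, 6 ], [ 7, 6, 8 ], [ 9, 8, 1 ] ]
--
-- def sumLine( ns, line ):
--     s = 0
--     for i in line:
--         s += ns[ i ]
--     return s
--
-- def isEverySumEqual( ns ):
--     s = sumLine( ns, LINES[ 0 ] )
--     for i in range( 1, len( LINES ) ):
--         s0 = s
--         s = sumLine( ns, LINES[ i ] )
--         if s != s0:
--             return False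
--     return True
-- ===== SOURCE B (Python) =====
-- # consecutive lines share a vertex, so two line-sums agree iff the sum of the
-- # cells they do not share agree: compare those differences instead of line-sums
-- DIFF_CELLS = [ ( [ 3, 4 ], [ 0, 1 ] ), ( [ 5, 6 ], [ 3, 2 ] ),
--                ( [ 7, 8 ], [ 5, 4 ] ), ( [ 9, 1 ], [ 7, 6 ] ) ]
--
-- def isEverySumEqual( ns ):
--     for plus, minus in DIFF_CELLS:
--         if sum( ns[ i ] for i in plus ) != sum( ns[ i ] for i in minus ):
--             return False
--     return True
-- ===== Notes on version B (the rewrite author's own statement) =====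
-- stated objective: alternative
-- what changed: A sums every full line and compares each line-sum with the previous one; B never forms a line-sum: using that consecutive lines share a vertex, it checks that for each consecutive pair the two non-shared cell pairs have equal sums (the shared cell cancels), driven by a table of cell-pair differences.
import Mathlib
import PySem

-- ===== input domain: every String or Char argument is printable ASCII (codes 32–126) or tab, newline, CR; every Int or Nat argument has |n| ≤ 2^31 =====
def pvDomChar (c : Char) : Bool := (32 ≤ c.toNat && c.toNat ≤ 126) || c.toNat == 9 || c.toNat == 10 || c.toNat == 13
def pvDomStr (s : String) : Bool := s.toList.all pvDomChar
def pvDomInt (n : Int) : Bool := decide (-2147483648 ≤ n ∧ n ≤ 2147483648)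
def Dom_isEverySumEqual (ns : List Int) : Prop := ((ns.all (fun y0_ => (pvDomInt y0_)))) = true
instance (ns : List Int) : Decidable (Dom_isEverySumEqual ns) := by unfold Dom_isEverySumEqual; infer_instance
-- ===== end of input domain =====

-- A compares consecutive full line-sums; B never forms a line-sum: consecutive lines share
-- a vertex, so it checks that the two non-shared cell pairs have equal sums instead
-- (objective: alternative).

-- the module constant LINES of Source A
def pvLINES : List (List Int) := [[0, 1, 2], [3, 2, 4], [5, 4, 6], [7, 6, 8], [9, 8, 1]]

-- Source A's helper sumLine; pyGetD is total (default 0) — exact on Pre_, where every read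
-- that the control flow reaches is in range
def pySumLine (ns : List Int) (line : List Int) : Int :=
  line.foldl (fun s i => s + PySem.List.pyGetD ns i 0) 0

-- ===== PORT A =====
def isEverySumEqualLoopA (ns : List Int) (s : Int) : List Int → Bool
  | [] => true
  | i :: rest =>
    let s0 := s
    let s' := pySumLine ns (PySem.List.pyGetD pvLINES i [])
    if s' ≠ s0 then false else isEverySumEqualLoopA ns s' rest

def isEverySumEqual (ns : List Int) : Bool :=
  isEverySumEqualLoopA ns (pySumLine ns (PySem.List.pyGetD pvLINES 0 []))
    (PySem.List.pyRange 1 5 1)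

-- ===== PORT B =====
-- Source B's module constant DIFF_CELLS
def pvDIFF_CELLS : List (List Int × List Int) :=
  [([3, 4], [0, 1]), ([5, 6], [3, 2]), ([7, 8], [5, 4]), ([9, 1], [7, 6])]

-- Source B's 'sum(ns[i] for i in cells)'; pyGetD total as above, exact on Pre_
def pyCellsSum (ns : List Int) (cells : List Int) : Int :=
  cells.foldl (fun s i => s + PySem.List.pyGetD ns i 0) 0

def isEverySumEqualLoopB (ns : List Int) : List (List Int × List Int) → Bool
  | [] => true
  | (plus, minus) :: rest =>
    if pyCellsSum ns plus ≠ pyCellsSum ns minus then false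
    else isEverySumEqualLoopB ns rest

def isEverySumEqual_alt (ns : List Int) : Bool :=
  isEverySumEqualLoopB ns pvDIFF_CELLS

-- ===== PRECONDITION & SPEC =====
-- the sum of cells i, j, k, used only to state Pre_
def pvCellSum (ns : List Int) (i j k : Nat) : Int := ns.getD i 0 + ns.getD j 0 + ns.getD k 0

-- Pre_ is exactly where Python A returns (elsewhere it raises IndexError, and Python B
-- raises there identically): all 10 cells are present, or the first line-sum mismatch
-- occurs before the loop would touch a missing cell.
def Pre_isEverySumEqual (ns : List Int) : Prop :=
  10 ≤ ns.length ∨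
  (5 ≤ ns.length ∧ pvCellSum ns 3 2 4 ≠ pvCellSum ns 0 1 2) ∨
  (7 ≤ ns.length ∧ pvCellSum ns 5 4 6 ≠ pvCellSum ns 3 2 4) ∨
  (9 ≤ ns.length ∧ pvCellSum ns 7 6 8 ≠ pvCellSum ns 5 4 6)
instance (ns : List Int) : Decidable (Pre_isEverySumEqual ns) := by
  unfold Pre_isEverySumEqual; infer_instance

def pvWitness_isEverySumEqual : List Int := [1, 1, 1, 1, 1, 1, 1, 1, 1, 1]

def Spec_isEverySumEqual (ns : List Int) (out : Bool) : Prop := out = isEverySumEqual_alt ns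
instance (ns : List Int) (out : Bool) : Decidable (Spec_isEverySumEqual ns out) := by
  unfold Spec_isEverySumEqual; infer_instance

-- ===== CLAIM (what is proved, stated in full; the proofs are below) =====
def Claim_equal_isEverySumEqual : Prop :=
  ∀ (ns : List Int), Dom_isEverySumEqual ns → Pre_isEverySumEqual ns →
    Spec_isEverySumEqual ns (isEverySumEqual ns)

-- ===== LEMMAS AND PROOFS =====

-- core fact, with the ten cell reads abstracted: each consecutive line-sum comparison
-- agrees with the corresponding non-shared-cells comparison (the shared cell cancels)
lemma shapes_agree (a b c d e f g h i j : Int) :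
    (if d + c + e ≠ a + b + c then false else
      if f + e + g ≠ d + c + e then false else
        if h + g + i ≠ f + e + g then false else
          if j + i + b ≠ h + g + i then false else true)
      = (if d + e ≠ a + b then false else
          if f + g ≠ d + c then false else
            if h + i ≠ f + e then false else
              if j + b ≠ h + g then false else true) := by
  split_ifs <;> first | rfl | omega

-- ===== VERDICT (by name: the statement is the Claim_ definition above) =====
theorem isEverySumEqual_spec : Claim_equal_isEverySumEqual := by
  intro ns _ _
  unfold Spec_isEverySumEqual isEverySumEqual isEverySumEqual_alt
  have hr : PySem.List.pyRange 1 5 1 = [1, 2, 3, 4] := by decide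
  rw [hr]
  simp only [isEverySumEqualLoopA, isEverySumEqualLoopB, pvLINES, pvDIFF_CELLS,
    pySumLine, pyCellsSum,
    show PySem.List.pyGetD ([[0, 1, 2], [3, 2, 4], [5, 4, 6], [7, 6, 8], [9, 8, 1]] : List (List Int)) (0 : Int) [] = [0, 1, 2] from by decide,
    show PySem.List.pyGetD ([[0, 1, 2], [3, 2, 4], [5, 4, 6], [7, 6, 8], [9, 8, 1]] : List (List Int)) (1 : Int) [] = [3, 2, 4] from by decide,
    show PySem.List.pyGetD ([[0, 1, 2], [3, 2, 4], [5, 4, 6], [7, 6, 8], [9, 8, 1]] : List (List Int)) (2 : Int) [] = [5, 4, 6] from by decide,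
    show PySem.List.pyGetD ([[0, 1, 2], [3, 2, 4], [5, 4, 6], [7, 6, 8], [9, 8, 1]] : List (List Int)) (3 : Int) [] = [7, 6, 8] from by decide,
    show PySem.List.pyGetD ([[0, 1, 2], [3, 2, 4], [5, 4, 6], [7, 6, 8], [9, 8, 1]] : List (List Int)) (4 : Int) [] = [9, 8, 1] from by decide,
    List.foldl, zero_add]
  exact shapes_agree _ _ _ _ _ _ _ _ _ _
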